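-- pv_equiv track=rewrite | github.com/Lewis0305/Mp4-Generator | frameMakerLib.py | organize_point
-- ===== SOURCE A (Python) =====
-- def organize_point(co_points, white_list):
--     organ_point = []
--     for point in co_points:
--         level = 0
--         for white in white_list:
--             if point[1] >= white[0] and point[1] <= white[1]:
--                 organ_point.append([point[0], level])
--                 break
--             level+=1
--     return organ_point
-- ===== SOURCE B (Python) =====
-- def organize_point(co_points, white_list):
--     # Loop interchange: sweep the interval list once, keeping per-point first-match levels.
--     best = [None] * len(co_points)
--     for level, white in enumerate(white_list):
--         lo, hi = white[0], white[1]
--         best = [b if b is not None else (level if lo <= p[1] <= hi else None)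
--                 for b, p in zip(best, co_points)]
--     return [[p[0], b] for p, b in zip(co_points, best) if b is not None]
-- ===== Notes on version B (the rewrite author's own statement) =====
-- stated objective: alternative
-- what changed: Loop interchange: instead of scanning all intervals per point with break, B sweeps the interval list once, maintaining via zip a per-point table of the first containing interval's level, then rebuilds the output in point order.
-- outside the precondition, e.g. on organize_point([[1, 2]], [[5]]): A returns [], B raises IndexError; on organize_point([[1, 2]], [[2, 3], [9]]): A returns [[1, 0]], B raises IndexError
import Mathlib
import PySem

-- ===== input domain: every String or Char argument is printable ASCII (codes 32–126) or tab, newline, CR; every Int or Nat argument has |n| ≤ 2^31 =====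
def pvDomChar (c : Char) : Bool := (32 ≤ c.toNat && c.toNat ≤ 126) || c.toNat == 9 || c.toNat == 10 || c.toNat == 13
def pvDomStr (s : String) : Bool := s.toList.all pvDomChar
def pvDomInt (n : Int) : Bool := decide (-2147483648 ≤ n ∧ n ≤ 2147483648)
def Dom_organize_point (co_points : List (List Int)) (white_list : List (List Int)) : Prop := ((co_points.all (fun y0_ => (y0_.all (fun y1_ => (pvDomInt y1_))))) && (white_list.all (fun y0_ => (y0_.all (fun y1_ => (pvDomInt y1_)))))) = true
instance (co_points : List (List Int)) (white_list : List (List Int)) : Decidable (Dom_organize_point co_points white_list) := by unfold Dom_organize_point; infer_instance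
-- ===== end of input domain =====

-- B replaces A's per-point scan (with break) by one sweep over the interval list that
-- maintains a per-point table of first-match levels; same cost, different traversal order.

-- ===== PORT A =====
-- inner 'for white in white_list' loop of A, with the break realised by returning
def opLoopA (organ : List (List Int)) (point : List Int) : List (List Int) → Int → List (List Int)
  | [], _ => organ
  | white :: ws, level =>
      if PySem.List.pyGetD point 1 0 ≥ PySem.List.pyGetD white 0 0 ∧
         PySem.List.pyGetD point 1 0 ≤ PySem.List.pyGetD white 1 0 then
        organ ++ [[PySem.List.pyGetD point 0 0, level]]
      else
        opLoopA organ point ws (level + 1)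

def organize_point (co_points : List (List Int)) (white_list : List (List Int)) : List (List Int) :=
  co_points.foldl (fun organ point => opLoopA organ point white_list 0) []

-- ===== PORT B =====
-- one zip step of B's comprehension: keep an already-assigned level, else test this interval
def altStep (level lo hi : Int) (b : Option Int) (p : List Int) : Option Int :=
  match b with
  | some v => some v
  | none =>
      if lo ≤ PySem.List.pyGetD p 1 0 ∧ PySem.List.pyGetD p 1 0 ≤ hi then some level else none

def organize_point_alt (co_points : List (List Int)) (white_list : List (List Int)) : List (List Int) :=
  let best := (PySem.List.enumerate white_list 0).foldl
    (fun best lw =>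
      List.zipWith (altStep lw.1 (PySem.List.pyGetD lw.2 0 0) (PySem.List.pyGetD lw.2 1 0)) best co_points)
    (List.replicate co_points.length (none : Option Int))
  (co_points.zip best).filterMap (fun pb =>
    match pb.2 with
    | some b => some [PySem.List.pyGetD pb.1 0 0, b]
    | none => none)

-- ===== PRECONDITION & SPEC =====
-- Pre_ excludes inputs containing a point or interval list with fewer than two elements:
-- there A raises IndexError, or returns a value only by accident of its short-circuit scan order.
def Pre_organize_point (co_points : List (List Int)) (white_list : List (List Int)) : Prop :=
  (∀ w ∈ white_list, 2 ≤ w.length) ∧ (white_list = [] ∨ ∀ p ∈ co_points, 2 ≤ p.length)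
instance (co_points : List (List Int)) (white_list : List (List Int)) : Decidable (Pre_organize_point co_points white_list) := by unfold Pre_organize_point; infer_instance

def pvWitness_organize_point : List (List Int) × List (List Int) :=
  ([[1, 2], [3, 10], [4, 4]], [[0, 3], [5, 12]])

def Spec_organize_point (co_points : List (List Int)) (white_list : List (List Int)) (out : List (List Int)) : Prop := out = organize_point_alt co_points white_list
instance (co_points : List (List Int)) (white_list : List (List Int)) (out : List (List Int)) : Decidable (Spec_organize_point co_points white_list out) := by unfold Spec_organize_point; infer_instance

-- ===== CLAIM (what is proved, stated in full; the proofs are below) =====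
def Claim_equal_organize_point : Prop := ∀ (co_points : List (List Int)) (white_list : List (List Int)), Dom_organize_point co_points white_list → Pre_organize_point co_points white_list → Spec_organize_point co_points white_list (organize_point co_points white_list)

-- ===== LEMMAS AND PROOFS =====

-- level (= index offset by `level`) of the first interval of `ws` containing `y`
def firstLev (y : Int) : List (List Int) → Int → Option Int
  | [], _ => none
  | w :: ws, level =>
      if PySem.List.pyGetD w 0 0 ≤ y ∧ y ≤ PySem.List.pyGetD w 1 0 then some level
      else firstLev y ws (level + 1)

theorem opLoopA_eq (point : List Int) (ws : List (List Int)) :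
    ∀ (organ : List (List Int)) (level : Int),
      opLoopA organ point ws level =
        organ ++ (match firstLev (PySem.List.pyGetD point 1 0) ws level with
                  | some l => [[PySem.List.pyGetD point 0 0, l]]
                  | none => []) := by
  induction ws with
  | nil => intro organ level; simp [opLoopA, firstLev]
  | cons w ws ih =>
      intro organ level
      by_cases hc : PySem.List.pyGetD w 0 0 ≤ PySem.List.pyGetD point 1 0 ∧
                    PySem.List.pyGetD point 1 0 ≤ PySem.List.pyGetD w 1 0
      · simp [opLoopA, firstLev, ge_iff_le, hc]
      · simp [opLoopA, firstLev, ge_iff_le, hc, ih]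

theorem organize_point_eq_filterMap (co_points white_list : List (List Int)) :
    organize_point co_points white_list =
      co_points.filterMap (fun p =>
        match firstLev (PySem.List.pyGetD p 1 0) white_list 0 with
        | some l => some [PySem.List.pyGetD p 0 0, l]
        | none => none) := by
  unfold organize_point
  suffices h : ∀ (acc : List (List Int)),
      co_points.foldl (fun organ point => opLoopA organ point white_list 0) acc =
        acc ++ co_points.filterMap (fun p =>
          match firstLev (PySem.List.pyGetD p 1 0) white_list 0 with
          | some l => some [PySem.List.pyGetD p 0 0, l]
          | none => none) by
    simpa using h []
  induction co_points with
  | nil => intro acc; simp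
  | cons p co ih =>
      intro acc
      rw [List.foldl_cons, ih, opLoopA_eq, List.filterMap_cons, List.append_assoc]
      cases firstLev (PySem.List.pyGetD p 1 0) white_list 0 <;> rfl

theorem zipWith_altStep_map (level lo hi : Int) (g : List Int → Option Int) (co : List (List Int)) :
    List.zipWith (altStep level lo hi) (co.map g) co =
      co.map (fun p => altStep level lo hi (g p) p) := by
  induction co with
  | nil => rfl
  | cons p co ih => simp [ih]

theorem foldB (co : List (List Int)) :
    ∀ (ws : List (List Int)) (s : Int) (g : List Int → Option Int),
      (PySem.List.enumerate ws s).foldl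
        (fun best lw =>
          List.zipWith (altStep lw.1 (PySem.List.pyGetD lw.2 0 0) (PySem.List.pyGetD lw.2 1 0)) best co)
        (co.map g) =
      co.map (fun p =>
        match g p with
        | some v => some v
        | none => firstLev (PySem.List.pyGetD p 1 0) ws s) := by
  intro ws
  induction ws with
  | nil =>
      intro s g
      simp only [PySem.List.enumerate_nil, List.foldl_nil]
      apply List.map_congr_left
      intro p _
      cases g p <;> simp [firstLev]
  | cons w ws ih =>
      intro s g
      simp only [PySem.List.enumerate_cons, List.foldl_cons, zipWith_altStep_map]
      rw [ih]
      apply List.map_congr_left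
      intro p _
      cases hg : g p with
      | some v => simp [altStep]
      | none =>
          simp only [altStep, firstLev]
          by_cases hc : PySem.List.pyGetD w 0 0 ≤ PySem.List.pyGetD p 1 0 ∧
                        PySem.List.pyGetD p 1 0 ≤ PySem.List.pyGetD w 1 0
          · simp [hc]
          · simp [hc]

theorem zip_map_filterMap (co : List (List Int)) (f : List Int → Option Int)
    (h : List Int × Option Int → Option (List Int)) :
    (co.zip (co.map f)).filterMap h = co.filterMap (fun p => h (p, f p)) := by
  induction co with
  | nil => rfl
  | cons p co ih => simp [List.filterMap_cons, ih]

theorem organize_point_alt_eq_filterMap (co_points white_list : List (List Int)) :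
    organize_point_alt co_points white_list =
      co_points.filterMap (fun p =>
        match firstLev (PySem.List.pyGetD p 1 0) white_list 0 with
        | some l => some [PySem.List.pyGetD p 0 0, l]
        | none => none) := by
  unfold organize_point_alt
  have hrep : List.replicate co_points.length (none : Option Int) =
      co_points.map (fun _ => none) := by simp
  rw [hrep, foldB co_points white_list 0 (fun _ => none), zip_map_filterMap]

-- ===== VERDICT (by name: the statement is the Claim_ definition above) =====
theorem organize_point_spec : Claim_equal_organize_point := by
  intro co ws _ _
  unfold Spec_organize_point
  rw [organize_point_eq_filterMap, organize_point_alt_eq_filterMap]
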